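-- pv_equiv track=rewrite | github.com/MZY199603/AutoEP | UAV Trajectory Optimization/ACO4.py | get_plot_data
-- ===== SOURCE A (Python) =====
-- def get_plot_data(cargo_site_car_list):
--     plot_data = []
--     a_car_path = []
--     for x in cargo_site_car_list:
--         if not x:
--             plot_data.append([0] + a_car_path + [0])
--             a_car_path = []
--         else:
--             a_car_path.append(x)
--     return plot_data
-- ===== SOURCE B (Python) =====
-- def get_plot_data(cargo_site_car_list):
--     # Recursive decomposition: split at the first falsy (0) delimiter and recurse
--     # on the remainder; a tail with no delimiter yields nothing.
--     if 0 not in cargo_site_car_list: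
--         return []
--     pos = cargo_site_car_list.index(0)
--     return [[0] + cargo_site_car_list[:pos] + [0]] + get_plot_data(cargo_site_car_list[pos + 1:])
-- ===== Notes on version B (the rewrite author's own statement) =====
-- stated objective: alternative
-- what changed: B is recursive with no accumulator: it finds the first falsy delimiter with .index, emits the preceding slice as one car path, and recurses on the suffix after it; A is a single imperative pass accumulating elements into a running a_car_path list.
import Mathlib
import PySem

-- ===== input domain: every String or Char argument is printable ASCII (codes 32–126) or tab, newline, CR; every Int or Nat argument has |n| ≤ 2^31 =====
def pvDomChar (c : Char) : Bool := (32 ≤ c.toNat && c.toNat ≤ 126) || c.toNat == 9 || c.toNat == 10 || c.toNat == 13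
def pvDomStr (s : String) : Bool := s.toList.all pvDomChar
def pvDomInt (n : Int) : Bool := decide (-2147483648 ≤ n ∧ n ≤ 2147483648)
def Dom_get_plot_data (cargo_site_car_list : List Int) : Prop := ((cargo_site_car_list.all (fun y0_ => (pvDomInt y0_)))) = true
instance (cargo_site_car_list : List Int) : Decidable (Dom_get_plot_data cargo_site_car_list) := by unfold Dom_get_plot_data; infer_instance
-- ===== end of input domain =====

-- B replaces A's single accumulating pass with an accumulator-free recursion that
-- splits at the first falsy delimiter and recurses on the suffix (objective: alternative).

-- ===== PORT A =====
def get_plot_data (cargo_site_car_list : List Int) : List (List Int) :=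
  (cargo_site_car_list.foldl
    (fun (st : List (List Int) × List Int) x =>
      if x = 0 then (st.1 ++ [[0] ++ st.2 ++ [0]], ([] : List Int))
      else (st.1, st.2 ++ [x]))
    ([], [])).1

-- ===== PORT B =====
-- termination lemma for the port's recursive call (cited in decreasing_by)
theorem pvSuffix_lt (l : List Int) (pos : Nat)
    (hp : PySem.List.index? l 0 = some pos) :
    (PySem.List.slice l (some ((pos : Int) + 1)) none).length < l.length := by
  obtain ⟨hk, _, _⟩ := PySem.List.getElem_of_index?_eq_some hp
  have : ((pos : Int) + 1) = ((pos + 1 : Nat) : Int) := by push_cast; ring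
  rw [this, PySem.List.slice_from_natCast]
  simp
  omega

-- '0 not in lst' / 'lst.index(0)' folded into one match on index? (none ⟺ not in)
def get_plot_data_alt (l : List Int) : List (List Int) :=
  match hp : PySem.List.index? l 0 with
  | none => []
  | some pos =>
      ([0] ++ PySem.List.slice l none (some (pos : Int)) ++ [0]) ::
        get_plot_data_alt (PySem.List.slice l (some ((pos : Int) + 1)) none)
termination_by l.length
decreasing_by exact pvSuffix_lt l pos hp

-- ===== PRECONDITION & SPEC =====
def Spec_get_plot_data (cargo_site_car_list : List Int) (out : List (List Int)) : Prop := out = get_plot_data_alt cargo_site_car_list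
instance (cargo_site_car_list : List Int) (out : List (List Int)) : Decidable (Spec_get_plot_data cargo_site_car_list out) := by unfold Spec_get_plot_data; infer_instance

-- ===== CLAIM =====
def Claim_equal_get_plot_data : Prop := ∀ (cargo_site_car_list : List Int), Dom_get_plot_data cargo_site_car_list → Spec_get_plot_data cargo_site_car_list (get_plot_data cargo_site_car_list)

-- ===== LEMMAS AND PROOFS =====

-- recursive characterisation of A's fold
def pvGo : List Int → List Int → List (List Int)
  | _, [] => []
  | cur, x :: t => if x = 0 then ([0] ++ cur ++ [0]) :: pvGo [] t else pvGo (cur ++ [x]) t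

theorem pvA_aux (t : List Int) : ∀ (acc : List (List Int)) (cur : List Int),
    (t.foldl
      (fun (st : List (List Int) × List Int) x =>
        if x = 0 then (st.1 ++ [[0] ++ st.2 ++ [0]], ([] : List Int))
        else (st.1, st.2 ++ [x]))
      (acc, cur)).1 = acc ++ pvGo cur t := by
  induction t with
  | nil => intro acc cur; simp [pvGo]
  | cons x t ih =>
    intro acc cur
    by_cases hx : x = 0
    · simp only [List.foldl_cons, if_pos hx]
      rw [ih]; simp [pvGo, hx, List.append_assoc]
    · simp only [List.foldl_cons, if_neg hx]
      rw [ih]; simp [pvGo, hx]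

theorem pvGo_no_zero : ∀ (t cur : List Int), (0 : Int) ∉ t → pvGo cur t = [] := by
  intro t
  induction t with
  | nil => intro cur _; simp [pvGo]
  | cons x t ih =>
    intro cur h
    have hx : x ≠ 0 := fun hx => h (hx ▸ List.mem_cons_self)
    simp only [pvGo, if_neg hx]
    exact ih _ (fun hm => h (List.mem_cons_of_mem _ hm))

theorem pvGo_split : ∀ (pre : List Int) (suf cur : List Int), (0 : Int) ∉ pre →
    pvGo cur (pre ++ 0 :: suf) = ([0] ++ (cur ++ pre) ++ [0]) :: pvGo [] suf := by
  intro pre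
  induction pre with
  | nil => intro suf cur _; simp [pvGo]
  | cons x p ih =>
    intro suf cur h
    have hx : x ≠ 0 := fun hx => h (hx ▸ List.mem_cons_self)
    simp only [List.cons_append, pvGo, if_neg hx]
    rw [ih suf (cur ++ [x]) (fun hm => h (List.mem_cons_of_mem _ hm))]
    simp

theorem pvAlt_eq_pvGo (l : List Int) : get_plot_data_alt l = pvGo [] l := by
  induction hn : l.length using Nat.strong_induction_on generalizing l with
  | _ n ih =>
  unfold get_plot_data_alt
  split
  · next hp =>
    have h0 : (0 : Int) ∉ l := (PySem.List.index?_eq_none_iff _ _).mp hp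
    exact (pvGo_no_zero l [] h0).symm
  · next pos hp =>
    obtain ⟨pre, suf, hl, hlen, hnin⟩ := (PySem.List.index?_eq_some_iff _ _ _).mp hp
    have hcast : ((pos : Int) + 1) = ((pos + 1 : Nat) : Int) := by push_cast; ring
    have hslice1 : PySem.List.slice l none (some (pos : Int)) = pre := by
      rw [PySem.List.slice_to_natCast, hl, ← hlen, List.take_left]
    have hslice2 : PySem.List.slice l (some ((pos : Int) + 1)) none = suf := by
      rw [hcast, PySem.List.slice_from_natCast, hl, ← hlen]
      simp [List.drop_append]
    rw [hslice1, hslice2, hl, pvGo_split pre suf [] hnin]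
    have hlt : suf.length < n := by
      subst hn; rw [hl]; simp; omega
    rw [ih suf.length hlt suf rfl]
    simp

-- ===== VERDICT =====
theorem get_plot_data_spec : Claim_equal_get_plot_data := by
  intro l _
  unfold Spec_get_plot_data get_plot_data
  rw [pvA_aux, pvAlt_eq_pvGo]
  simp
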